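-- pv_equiv track=rewrite | github.com/CopticScriptorium/coptic-nlp | eval/eval_parsing.py | nomisc
-- ===== SOURCE A (Python) =====
-- def nomisc(conllu):
--     output = []
--     lines = conllu.split("\n")
--     for line in lines:
--         if "\t" in line:
--             fields = line.split("\t")
--             fields[-1] = "_"
--             line = "\t".join(fields)
--         output.append(line)
--     return "\n".join(output)
-- ===== SOURCE B (Python) =====
-- import re
--
-- def nomisc(conllu):
--     # One multiline regex substitution: per line, the last tab and the trailing
--     # field (no tabs/newlines in it) become "\t_". Lines without a tab never match.
--     return re.sub(r'\t[^\t\n]*$', '\t_', conllu, flags=re.M)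
-- ===== Notes on version B (the rewrite author's own statement) =====
-- stated objective: idiomatic
-- what changed: Replaced the explicit line loop with per-line field splitting/rejoining by a single multiline regex substitution that rewrites each line's last tab plus trailing field to a tab and underscore.
import Mathlib
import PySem

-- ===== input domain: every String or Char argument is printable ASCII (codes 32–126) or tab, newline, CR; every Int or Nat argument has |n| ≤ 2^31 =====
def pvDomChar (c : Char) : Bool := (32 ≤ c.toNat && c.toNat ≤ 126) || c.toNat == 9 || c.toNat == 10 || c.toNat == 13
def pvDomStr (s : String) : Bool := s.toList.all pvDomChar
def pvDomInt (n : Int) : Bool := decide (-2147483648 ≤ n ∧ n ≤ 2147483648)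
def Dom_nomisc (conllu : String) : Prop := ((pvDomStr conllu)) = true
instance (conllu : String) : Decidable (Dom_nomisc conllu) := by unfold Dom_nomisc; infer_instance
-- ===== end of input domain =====

-- B replaces A's line loop + field list by one multiline regex substitution (idiomatic; return value only, no mutation).

-- ===== PORT A =====
-- loop body of A: if "\t" in line: fields = line.split("\t"); fields[-1] = "_"; line = "\t".join(fields)
def nomiscLine (line : List Char) : List Char :=
  if PySem.Chars.isIn ['\t'] line then
    let fields := PySem.Chars.splitOn line ['\t']
    let fields := fields.dropLast ++ [['_']]   -- fields[-1] = "_"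
    PySem.Chars.join ['\t'] fields
  else line

def nomisc (conllu : String) : String :=
  let lines := PySem.Chars.splitOn conllu.toList ['\n']
  let output := lines.foldl (fun output line => output ++ [nomiscLine line]) ([] : List (List Char))
  String.ofList (PySem.Chars.join ['\n'] output)

-- ===== PORT B =====
-- hand port of the regex engine for re.sub(r'\t[^\t\n]*$', '\t_', s, flags=re.M):
-- a match attempt starting at a '\t' consumes [^\t\n]* and must then sit at a line end.
def restOfField : List Char → Option (List Char)
  | [] => some []
  | c :: r => if c = '\t' then none else if c = '\n' then some (c :: r) else restOfField r

theorem restOfField_length : ∀ (r rest : List Char), restOfField r = some rest → rest.length ≤ r.length := by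
  intro r
  induction r with
  | nil => intro rest hr; simp [restOfField] at hr; simp [← hr]
  | cons c t ih =>
    intro rest h
    simp only [restOfField] at h
    split_ifs at h with h1 h2
    · simp at h; simp [← h]
    · have := ih rest h; simp; omega

-- left-to-right scan: try the pattern at each position, emit "\t_" on a match and resume after it
def scanSub : List Char → List Char
  | [] => []
  | c :: r =>
    if c = '\t' then
      match h : restOfField r with
      | some rest => '\t' :: '_' :: scanSub rest
      | none => c :: scanSub r
    else c :: scanSub r
termination_by cs => cs.length
decreasing_by
  · have := restOfField_length r rest h; simp; omega
  · simp
  · simp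

def nomisc_alt (conllu : String) : String :=
  String.ofList (scanSub conllu.toList)

-- ===== PRECONDITION & SPEC =====
def Spec_nomisc (conllu : String) (out : String) : Prop := out = nomisc_alt conllu
instance (conllu : String) (out : String) : Decidable (Spec_nomisc conllu out) := by unfold Spec_nomisc; infer_instance

-- ===== CLAIM (what is proved, stated in full; the proofs are below) =====
def Claim_equal_nomisc : Prop := ∀ (conllu : String), Dom_nomisc conllu → Spec_nomisc conllu (nomisc conllu)

-- ===== LEMMAS AND PROOFS =====

-- simple reference splitter on a single separator character
def lines1 (c : Char) : List Char → List (List Char)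
  | [] => [[]]
  | a :: r => if a = c then [] :: lines1 c r else (lines1 c r).modifyHead (a :: ·)

theorem lines1_length (c : Char) (l : List Char) :
    (lines1 c l).length = l.count c + 1 := by
  induction l with
  | nil => simp [lines1]
  | cons a r ih =>
    by_cases h : a = c
    · simp [lines1, h, ih]
    · simp [lines1, h, ih]

theorem lines1_ne_nil (c : Char) (l : List Char) : lines1 c l ≠ [] := by
  intro h
  have := lines1_length c l
  rw [h] at this; simp at this

theorem modifyHead_nil_append (L : List (List Char)) :
    L.modifyHead (fun x => [] ++ x) = L := by cases L <;> simp

theorem splitOn_go_spec (c : Char) (fuel : Nat) :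
    ∀ (l cur : List Char) (acc : List (List Char)), l.length ≤ fuel →
      PySem.Chars.splitOn.go [c] fuel l cur acc =
        acc.reverse ++ (lines1 c l).modifyHead (cur.reverse ++ ·) := by
  induction fuel with
  | zero =>
    intro l cur acc h
    have : l = [] := by cases l <;> simp_all
    subst this
    simp [PySem.Chars.splitOn.go, lines1]
  | succ n ih =>
    intro l cur acc h
    cases l with
    | nil => simp [PySem.Chars.splitOn.go, lines1]
    | cons a rest =>
      by_cases hac : c = a
      · subst hac
        have hp : List.isPrefixOf [c] (c :: rest) = true := by simp [List.isPrefixOf]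
        rw [show PySem.Chars.splitOn.go [c] (n+1) (c :: rest) cur acc =
            PySem.Chars.splitOn.go [c] n (List.drop (List.length [c]) (c :: rest)) [] (cur.reverse :: acc) by
          simp [PySem.Chars.splitOn.go, hp]]
        simp only [List.length_singleton, List.drop_succ_cons, List.drop_zero]
        rw [ih rest [] (cur.reverse :: acc) (by simpa using h)]
        have : (fun (x : List Char) => x) = id := rfl
        simp [lines1, modifyHead_nil_append, this, List.modifyHead_id]
      · have hp : List.isPrefixOf [c] (a :: rest) = false := by
          simp only [List.isPrefixOf, List.isPrefixOf_nil_left, Bool.and_eq_false_iff]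
          exact Or.inl (by simp; exact fun hh => hac hh)
        rw [show PySem.Chars.splitOn.go [c] (n+1) (a :: rest) cur acc =
            PySem.Chars.splitOn.go [c] n rest (a :: cur) acc by
          simp [PySem.Chars.splitOn.go, hp]]
        rw [ih rest (a :: cur) acc (by simpa using h)]
        have hsh : lines1 c (a :: rest) = (lines1 c rest).modifyHead (a :: ·) := by
          have hne : ¬ a = c := fun hh => hac hh.symm
          simp [lines1, hne]
        rw [hsh]
        obtain ⟨hd, tl, he⟩ : ∃ hd tl, lines1 c rest = hd :: tl := by
          cases hl : lines1 c rest with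
          | nil => exact absurd hl (lines1_ne_nil c rest)
          | cons hd tl => exact ⟨hd, tl, rfl⟩
        simp [he]

theorem splitOn_eq_lines1 (c : Char) (l : List Char) :
    PySem.Chars.splitOn l [c] = lines1 c l := by
  unfold PySem.Chars.splitOn
  rw [splitOn_go_spec c (l.length + 1) l [] [] (by omega)]
  have hid : (fun (x : List Char) => x) = id := rfl
  simp [hid, List.modifyHead_id]

theorem singleton_infix_iff (c : Char) (l : List Char) : [c] <:+: l ↔ c ∈ l := by
  constructor
  · intro h
    exact (List.singleton_sublist.mp h.sublist)
  · intro h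
    obtain ⟨s, t, hst⟩ := List.append_of_mem h
    exact ⟨s, t, by simp [hst]⟩

theorem isIn_singleton (c : Char) (l : List Char) :
    PySem.Chars.isIn [c] l = true ↔ c ∈ l := by
  rw [PySem.Chars.isIn_iff_infix, singleton_infix_iff]

theorem lines1_no (c : Char) (a : List Char) (h : c ∉ a) : lines1 c a = [a] := by
  induction a with
  | nil => simp [lines1]
  | cons x r ih =>
    simp at h
    simp [lines1, show ¬x = c from fun hh => h.1 hh.symm, ih h.2]

theorem lines1_append_cons (c : Char) (a r : List Char) (h : c ∉ a) :
    lines1 c (a ++ c :: r) = a :: lines1 c r := by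
  induction a with
  | nil => simp [lines1]
  | cons x t ih =>
    simp at h
    have := ih h.2
    obtain ⟨hd, tl, he⟩ : ∃ hd tl, lines1 c (t ++ c :: r) = hd :: tl := by
      cases hl : lines1 c (t ++ c :: r) with
      | nil => exact absurd hl (lines1_ne_nil c _)
      | cons hd tl => exact ⟨hd, tl, rfl⟩
    rw [he] at this
    cases this
    simp [lines1, show ¬x = c from fun hh => h.1 hh.symm, he]

-- characterisations of A's loop body
theorem nomiscLine_no_tab (a : List Char) (h : '\t' ∉ a) : nomiscLine a = a := by
  unfold nomiscLine
  rw [if_neg]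
  simp [isIn_singleton, h]

theorem nomiscLine_tab_no (a : List Char) (h : '\t' ∉ a) :
    nomiscLine ('\t' :: a) = ['\t', '_'] := by
  unfold nomiscLine
  rw [if_pos (by simp [isIn_singleton])]
  rw [splitOn_eq_lines1]
  simp [lines1, lines1_no '\t' a h, PySem.Chars.join_cons_cons, PySem.Chars.join_singleton]

theorem nomiscLine_tab_yes (a : List Char) (h : '\t' ∈ a) :
    nomiscLine ('\t' :: a) = '\t' :: nomiscLine a := by
  unfold nomiscLine
  rw [if_pos (by simp [isIn_singleton]), if_pos (by simp [isIn_singleton, h])]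
  rw [splitOn_eq_lines1, splitOn_eq_lines1]
  have hlen : (lines1 '\t' a).length = a.count '\t' + 1 := lines1_length _ _
  have hc : 1 ≤ a.count '\t' := List.one_le_count_iff.mpr h
  obtain ⟨h1, h2, tl, he⟩ : ∃ h1 h2 tl, lines1 '\t' a = h1 :: h2 :: tl := by
    cases hl : lines1 '\t' a with
    | nil => exact absurd hl (lines1_ne_nil _ _)
    | cons h1 t =>
      cases t with
      | nil => rw [hl] at hlen; simp at hlen; omega
      | cons h2 tl => exact ⟨h1, h2, tl, rfl⟩
  show PySem.Chars.join ['\t'] ((lines1 '\t' ('\t' :: a)).dropLast ++ [['_']]) = _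
  have : lines1 '\t' ('\t' :: a) = [] :: lines1 '\t' a := by simp [lines1]
  rw [this, he]
  simp [PySem.Chars.join_cons_cons]

theorem nomiscLine_cons (x : Char) (a : List Char) (hx : x ≠ '\t') (h : '\t' ∈ a) :
    nomiscLine (x :: a) = x :: nomiscLine a := by
  unfold nomiscLine
  rw [if_pos (by simp [isIn_singleton, h]), if_pos (by simp [isIn_singleton, h])]
  rw [splitOn_eq_lines1, splitOn_eq_lines1]
  have hlen : (lines1 '\t' a).length = a.count '\t' + 1 := lines1_length _ _
  have hc : 1 ≤ a.count '\t' := List.one_le_count_iff.mpr h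
  obtain ⟨h1, h2, tl, he⟩ : ∃ h1 h2 tl, lines1 '\t' a = h1 :: h2 :: tl := by
    cases hl : lines1 '\t' a with
    | nil => exact absurd hl (lines1_ne_nil _ _)
    | cons h1 t =>
      cases t with
      | nil => rw [hl] at hlen; simp at hlen; omega
      | cons h2 tl => exact ⟨h1, h2, tl, rfl⟩
  have : lines1 '\t' (x :: a) = (lines1 '\t' a).modifyHead (x :: ·) := by
    simp [lines1, hx]
  rw [this, he]
  simp only [List.modifyHead_cons, List.dropLast_cons₂, List.cons_append]
  obtain ⟨z, zs, hz⟩ : ∃ z zs, (h2 :: tl).dropLast ++ [['_']] = z :: zs := by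
    cases hh : (h2 :: tl).dropLast ++ [['_']] with
    | nil => simp at hh
    | cons z zs => exact ⟨z, zs, rfl⟩
  rw [hz, PySem.Chars.join_cons_cons, PySem.Chars.join_cons_cons]
  simp

-- restOfField on a tab-free, newline-free field followed by a line end
theorem restOfField_some (a tail : List Char) (ht : '\t' ∉ a) (hn : '\n' ∉ a)
    (htl : tail = [] ∨ ∃ r, tail = '\n' :: r) : restOfField (a ++ tail) = some tail := by
  induction a with
  | nil =>
    rcases htl with h | ⟨r, h⟩ <;> subst h <;> simp [restOfField]
  | cons x t ih =>
    simp at ht hn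
    simp [restOfField, show ¬x = '\t' from fun hh => ht.1 hh.symm,
      show ¬x = '\n' from fun hh => hn.1 hh.symm, ih ht.2 hn.2]

theorem restOfField_none (a tail : List Char) (ht : '\t' ∈ a) (hn : '\n' ∉ a) :
    restOfField (a ++ tail) = none := by
  induction a with
  | nil => simp at ht
  | cons x t ih =>
    simp at ht hn
    by_cases hx : x = '\t'
    · simp [restOfField, hx]
    · have : '\t' ∈ t := ht.resolve_left (fun hh => hx hh.symm)
      simp [restOfField, hx, show ¬x = '\n' from fun hh => hn.1 hh.symm, ih this hn.2]

-- one line of the scan: on a newline-free segment followed by a line boundary,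
-- the regex scan produces exactly A's per-line result
theorem scanSub_line (a tail : List Char) (hn : '\n' ∉ a)
    (htl : tail = [] ∨ ∃ r, tail = '\n' :: r) :
    scanSub (a ++ tail) = nomiscLine a ++ scanSub tail := by
  induction a with
  | nil => simp [nomiscLine_no_tab [] (by simp)]
  | cons x t ih =>
    simp at hn
    by_cases hx : x = '\t'
    · subst hx
      by_cases htab : '\t' ∈ t
      · rw [show ('\t' :: t) ++ tail = '\t' :: (t ++ tail) by simp]
        rw [scanSub]
        rw [if_pos rfl]
        rw [restOfField_none t tail htab hn.2]
        rw [ih hn.2, nomiscLine_tab_yes t htab]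
        simp
      · rw [show ('\t' :: t) ++ tail = '\t' :: (t ++ tail) by simp]
        rw [scanSub]
        rw [if_pos rfl]
        rw [restOfField_some t tail htab hn.2 htl]
        rw [nomiscLine_tab_no t htab]
        simp
    · rw [show (x :: t) ++ tail = x :: (t ++ tail) by simp]
      rw [scanSub, if_neg hx, ih hn.2]
      by_cases htab : '\t' ∈ t
      · rw [nomiscLine_cons x t hx htab]; simp
      · rw [nomiscLine_no_tab t htab,
          nomiscLine_no_tab (x :: t) (by simp [htab]; exact fun hh => hx hh.symm)]
        simp

theorem exists_first_split (c : Char) : ∀ (cs : List Char), c ∈ cs →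
    ∃ a r, cs = a ++ c :: r ∧ c ∉ a := by
  intro cs
  induction cs with
  | nil => intro h; simp at h
  | cons x t ih =>
    intro h
    by_cases hx : x = c
    · exact ⟨[], t, by simp [hx], by simp⟩
    · have : c ∈ t := (List.mem_cons.mp h).resolve_left (fun hh => hx hh.symm)
      obtain ⟨a, r, he, hna⟩ := ih this
      refine ⟨x :: a, r, by simp [he], ?_⟩
      simp [hna]
      exact fun hh => hx hh.symm

-- the main list-level equivalence
theorem scanSub_eq (cs : List Char) :
    scanSub cs = PySem.Chars.join ['\n'] ((lines1 '\n' cs).map nomiscLine) := by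
  by_cases h : '\n' ∈ cs
  · obtain ⟨a, r, he, hna⟩ := exists_first_split '\n' cs h
    subst he
    rw [lines1_append_cons '\n' a r hna]
    obtain ⟨hd, tl, hrr⟩ : ∃ hd tl, lines1 '\n' r = hd :: tl := by
      cases hl : lines1 '\n' r with
      | nil => exact absurd hl (lines1_ne_nil _ _)
      | cons hd tl => exact ⟨hd, tl, rfl⟩
    rw [scanSub_line a ('\n' :: r) hna (Or.inr ⟨r, rfl⟩)]
    rw [show scanSub ('\n' :: r) = '\n' :: scanSub r by rw [scanSub]; simp]
    rw [scanSub_eq r]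
    rw [hrr]
    simp [PySem.Chars.join_cons_cons]
  · have h2 := scanSub_line cs [] h (Or.inl rfl)
    simp [scanSub] at h2
    rw [lines1_no '\n' cs h]
    simp [PySem.Chars.join_singleton, h2]
termination_by cs.length
decreasing_by simp [he]; omega

theorem foldl_append_map (f : List Char → List Char) (xs : List (List Char)) :
    ∀ acc, xs.foldl (fun output line => output ++ [f line]) acc = acc ++ xs.map f := by
  induction xs with
  | nil => intro acc; simp
  | cons x t ih => intro acc; simp [ih]

-- ===== VERDICT (by name: the statement is the Claim_ definition above) =====
theorem nomisc_spec : Claim_equal_nomisc := by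
  intro conllu _
  unfold Spec_nomisc nomisc_alt
  show String.ofList (PySem.Chars.join ['\n']
      ((PySem.Chars.splitOn conllu.toList ['\n']).foldl
        (fun output line => output ++ [nomiscLine line]) [])) = _
  rw [scanSub_eq, foldl_append_map, splitOn_eq_lines1]
  simp
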